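-- pv_equiv track=rewrite | github.com/tara072/CP471-compilers | lexical/lexer.py | getKeywordToken
-- ===== SOURCE A (Python) =====
-- def getKeywordToken(keyword, keyArray):
--     is_keyword = False
--     token = ''
--     i = 0
--     while not is_keyword and i < len(keyArray):
--         j = 1
--         while not is_keyword and j < len(keyArray[i]):
--             if keyword.strip().lower() == keyArray[i][j]:
--                 is_keyword = True
--                 token = keyArray[i][0]
--             else: j += 1
--         i += 1
--     if not is_keyword: token = 'identifier'
--     return (token)
-- ===== SOURCE B (Python) =====
-- def getKeywordToken(keyword, keyArray):
--     k = keyword.strip().lower()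
--     table = {}
--     for row in keyArray:
--         for kw in row[1:]:
--             if kw not in table:
--                 table[kw] = row[0]
--     return table.get(k, 'identifier')
-- ===== Notes on version B (the rewrite author's own statement) =====
-- stated objective: faster
-- what changed: Replaces the flag-driven nested early-exit while loops with computing keyword.strip().lower() once, building a first-occurrence-wins keyword-to-token dict, and a single dict lookup with 'identifier' as default.
import Mathlib
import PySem

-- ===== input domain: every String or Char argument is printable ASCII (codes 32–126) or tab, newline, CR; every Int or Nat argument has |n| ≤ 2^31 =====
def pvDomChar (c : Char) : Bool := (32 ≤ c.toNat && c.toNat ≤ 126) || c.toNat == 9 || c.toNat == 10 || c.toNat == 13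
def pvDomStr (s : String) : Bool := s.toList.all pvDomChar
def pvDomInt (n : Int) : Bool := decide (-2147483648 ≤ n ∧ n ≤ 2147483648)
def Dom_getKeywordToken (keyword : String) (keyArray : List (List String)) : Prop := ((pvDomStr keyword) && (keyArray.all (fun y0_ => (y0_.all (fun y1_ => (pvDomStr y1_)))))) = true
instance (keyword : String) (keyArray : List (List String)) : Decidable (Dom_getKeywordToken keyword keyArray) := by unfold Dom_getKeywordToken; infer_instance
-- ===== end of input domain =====

-- B builds a first-occurrence-wins keyword->token dict once and does one lookup; same return values, idiomatic.
-- ===== PORT A =====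
-- inner while loop of A: scan row[1:] for keyword.strip().lower() (recomputed per comparison, as A does)
def pvScanA (keyword : String) : List String → Bool
  | [] => false
  | c :: cs => if PySem.Str.lower (PySem.Str.strip keyword) == c then true else pvScanA keyword cs

-- outer while loop of A: first matching row yields row[0], else 'identifier'
def pvLoopA (keyword : String) : List (List String) → String
  | [] => "identifier"
  | row :: rest => if pvScanA keyword (row.drop 1) then row.headD "" else pvLoopA keyword rest

def getKeywordToken (keyword : String) (keyArray : List (List String)) : String :=
  pvLoopA keyword keyArray

-- ===== PORT B =====
-- for kw in row[1:]: if kw not in table: table[kw] = row[0]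
def pvAddRow (h : String) (d : PySem.Dict String String) (cells : List String) : PySem.Dict String String :=
  cells.foldl (fun d kw => if d.contains kw then d else d.insert kw h) d

def pvBuildTable (keyArray : List (List String)) : PySem.Dict String String :=
  keyArray.foldl (fun d row => pvAddRow (row.headD "") d (row.drop 1)) PySem.Dict.empty

def getKeywordToken_alt (keyword : String) (keyArray : List (List String)) : String :=
  (pvBuildTable keyArray).getD (PySem.Str.lower (PySem.Str.strip keyword)) "identifier"

-- ===== PRECONDITION & SPEC =====
def Spec_getKeywordToken (keyword : String) (keyArray : List (List String)) (out : String) : Prop := out = getKeywordToken_alt keyword keyArray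
instance (keyword : String) (keyArray : List (List String)) (out : String) : Decidable (Spec_getKeywordToken keyword keyArray out) := by unfold Spec_getKeywordToken; infer_instance

-- ===== CLAIM (what is proved, stated in full; the proofs are below) =====
def Claim_equal_getKeywordToken : Prop := ∀ (keyword : String) (keyArray : List (List String)), Dom_getKeywordToken keyword keyArray → Spec_getKeywordToken keyword keyArray (getKeywordToken keyword keyArray)

-- ===== LEMMAS AND PROOFS =====

-- inner-loop invariant: looking up the key after folding a row equals the old lookup, or the
-- row head if A's inner scan finds the key
theorem pvAddRow_get? (keyword h : String) (cells : List String)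
    (d : PySem.Dict String String) :
    (pvAddRow h d cells).get? (PySem.Str.lower (PySem.Str.strip keyword)) =
      match d.get? (PySem.Str.lower (PySem.Str.strip keyword)) with
      | some v => some v
      | none => if pvScanA keyword cells then some h else none := by
  induction cells generalizing d with
  | nil => simp [pvAddRow, pvScanA]; cases d.get? (PySem.Str.lower (PySem.Str.strip keyword)) <;> rfl
  | cons c cs ih =>
    simp only [pvAddRow, List.foldl_cons] at *
    by_cases hc : d.contains c
    · simp only [hc, if_true, ih]
      by_cases hk : PySem.Str.lower (PySem.Str.strip keyword) = c
      · have : (d.get? (PySem.Str.lower (PySem.Str.strip keyword))).isSome := by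
          rw [← PySem.Dict.contains_eq_isSome_get?, hk]; exact hc
        cases hget : d.get? (PySem.Str.lower (PySem.Str.strip keyword)) with
        | none => rw [hget] at this; simp at this
        | some v => rfl
      · simp only [pvScanA, beq_iff_eq, hk, if_false]
    · rw [Bool.not_eq_true] at hc
      simp only [hc, Bool.false_eq_true, if_false, ih]
      by_cases hk : PySem.Str.lower (PySem.Str.strip keyword) = c
      · have hnone : d.get? (PySem.Str.lower (PySem.Str.strip keyword)) = none := by
          have := PySem.Dict.contains_eq_isSome_get? (d := d) (k := c)
          rw [hk]; cases hget : d.get? c with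
          | none => rfl
          | some v => rw [hget, hc] at this; simp at this
        rw [PySem.Dict.get?_insert, if_pos hk, hnone]
        simp [pvScanA, hk]
      · rw [PySem.Dict.get?_insert, if_neg hk]
        simp only [pvScanA, beq_iff_eq, hk, if_false]

-- outer-loop invariant: the built dict answers exactly as A's row-by-row search
theorem pvBuild_getD (keyword : String) (rows : List (List String))
    (d : PySem.Dict String String) :
    (rows.foldl (fun d row => pvAddRow (row.headD "") d (row.drop 1)) d).getD
        (PySem.Str.lower (PySem.Str.strip keyword)) "identifier" =
      match d.get? (PySem.Str.lower (PySem.Str.strip keyword)) with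
      | some v => v
      | none => pvLoopA keyword rows := by
  induction rows generalizing d with
  | nil =>
    simp only [List.foldl_nil, pvLoopA, PySem.Dict.getD_eq_get?_getD]
    cases d.get? (PySem.Str.lower (PySem.Str.strip keyword)) <;> rfl
  | cons row rest ih =>
    simp only [List.foldl_cons, ih, pvAddRow_get?, pvLoopA]
    cases d.get? (PySem.Str.lower (PySem.Str.strip keyword)) with
    | some v => rfl
    | none =>
      rw [List.drop_one] at *
      by_cases hs : pvScanA keyword row.tail <;> simp [hs]

-- ===== VERDICT (by name: the statement is the Claim_ definition above) =====
theorem getKeywordToken_spec : Claim_equal_getKeywordToken := by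
  intro keyword keyArray _
  show getKeywordToken keyword keyArray = getKeywordToken_alt keyword keyArray
  rw [getKeywordToken, getKeywordToken_alt, pvBuildTable, pvBuild_getD,
    PySem.Dict.get?_empty]
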